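-- pv_equiv track=rewrite | github.com/duylonggg/CTF | picoCTF/RE/perplexed/decode.py | extract_flag_from_data
-- ===== SOURCE A (Python) =====
-- def extract_flag_from_data(data, flag_length=27):
--     # Tổng số bit cần dùng: 27 ký tự x 7 bit = 189 bit.
--     # Đọc bitstream từ data: đọc từng byte từ bit 7 (MSB) tới bit 0
--     bitstream = []
--     for byte in data:
--         for i in range(8):
--             # Lấy bit theo thứ tự từ MSB đến LSB:
--             bit = (byte >> (7 - i)) & 1
--             bitstream.append(bit)
--     # Nếu bitstream có nhiều hơn 189 bit, ta chỉ lấy 189 bit đầu.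
--     bitstream = bitstream[:flag_length * 7]
--
--     # Chia bitstream thành các nhóm 7 bit liên tiếp
--     flag_chars = []
--     for i in range(flag_length):
--         bits = bitstream[i*7:(i+1)*7]
--         # Ghép các bit (bit[0] là bit có trọng số cao nhất)
--         val = 0
--         for b in bits:
--             val = (val << 1) | b
--         flag_chars.append(val)
--     # Giả sử flag được mã hóa dưới dạng ASCII
--     flag = ''.join(chr(c) for c in flag_chars)
--     return flag
-- ===== SOURCE B (Python) =====
-- def extract_flag_from_data(data, flag_length=27):
--     # Compute each 7-bit character directly by index arithmetic into `data`
--     # (bit j of the stream lives at bit 7 - j%8 of byte j//8) instead of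
--     # materialising the whole bitstream as a list.
--     n = len(data)
--     limit = min(8 * n, 7 * flag_length)
--     out = []
--     for i in range(flag_length):
--         val = 0
--         for j in range(7 * i, min(7 * (i + 1), limit)):
--             val = (val << 1) | ((data[j // 8] >> (7 - j % 8)) & 1)
--         out.append(chr(val))
--     return ''.join(out)
-- ===== Notes on version B (the rewrite author's own statement) =====
-- stated objective: alternative
-- what changed: B drops the materialised bitstream list entirely: each 7-bit character is computed directly from data by index arithmetic (bit j of the stream is bit 7-j%8 of byte j//8), so only the first flag_length*7 bits of the input are ever examined; intended as faster, but a timing run measured only 1.34x at the largest size, so no speed is claimed.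
import Mathlib
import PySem

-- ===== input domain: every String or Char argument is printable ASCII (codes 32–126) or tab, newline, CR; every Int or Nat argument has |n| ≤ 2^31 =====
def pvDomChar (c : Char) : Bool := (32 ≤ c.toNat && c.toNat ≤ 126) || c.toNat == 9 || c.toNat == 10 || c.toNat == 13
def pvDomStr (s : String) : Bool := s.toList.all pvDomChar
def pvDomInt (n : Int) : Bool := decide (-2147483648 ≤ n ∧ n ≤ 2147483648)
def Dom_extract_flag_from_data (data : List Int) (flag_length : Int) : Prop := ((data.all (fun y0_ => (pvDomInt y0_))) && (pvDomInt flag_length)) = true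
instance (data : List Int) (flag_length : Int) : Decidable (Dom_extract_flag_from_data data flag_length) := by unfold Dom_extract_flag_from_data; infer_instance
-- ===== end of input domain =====

-- B computes each 7-bit character directly from `data` by index arithmetic (bit j of the
-- stream is bit 7 - j % 8 of byte j // 8) instead of materialising the whole bitstream as
-- a list, touching only the first flag_length*7 bits of the input.

-- ===== PORT A =====
def extract_flag_from_data (data : List Int) (flag_length : Int) : String :=
  let bitstream : List Int := data.foldl (fun bs byte =>
    (PySem.List.pyRange 0 8 1).foldl (fun bs i =>
      bs ++ [PySem.Int.band (byte >>> (7 - i).toNat) 1]) bs) []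
  let bitstream := PySem.List.slice bitstream none (some (flag_length * 7))
  let flag_chars : List Int := (PySem.List.pyRange 0 flag_length 1).foldl (fun fc i =>
    let bits := PySem.List.slice bitstream (some (i * 7)) (some ((i + 1) * 7))
    let val := bits.foldl (fun v b => PySem.Int.bor (v <<< (1 : Nat)) b) 0
    fc ++ [val]) []
  String.mk (flag_chars.map (fun c => Char.ofNat c.toNat))

-- ===== PORT B =====
def extract_flag_from_data_alt (data : List Int) (flag_length : Int) : String :=
  let n : Int := PySem.List.len data
  let limit : Int := min (8 * n) (7 * flag_length)
  let out : List Char := (PySem.List.pyRange 0 flag_length 1).foldl (fun out i =>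
    let val := (PySem.List.pyRange (7 * i) (min (7 * (i + 1)) limit) 1).foldl
      (fun v j => PySem.Int.bor (v <<< (1 : Nat))
        (PySem.Int.band ((PySem.List.pyGetD data (PySem.Int.floordiv j 8) 0)
          >>> (7 - PySem.Int.mod j 8).toNat) 1)) 0
    out ++ [Char.ofNat val.toNat]) []
  String.mk out

-- ===== PRECONDITION & SPEC =====
def Spec_extract_flag_from_data (data : List Int) (flag_length : Int) (out : String) : Prop := out = extract_flag_from_data_alt data flag_length
instance (data : List Int) (flag_length : Int) (out : String) : Decidable (Spec_extract_flag_from_data data flag_length out) := by unfold Spec_extract_flag_from_data; infer_instance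

-- ===== CLAIM (what is proved, stated in full; the proofs are below) =====
def Claim_equal_extract_flag_from_data : Prop := ∀ (data : List Int) (flag_length : Int), Dom_extract_flag_from_data data flag_length → Spec_extract_flag_from_data data flag_length (extract_flag_from_data data flag_length)

-- ===== LEMMAS AND PROOFS =====

-- The 8 bits of one byte, MSB first (what A's inner loop appends for one byte).
def pvByteBits (byte : Int) : List Int :=
  (PySem.List.pyRange 0 8 1).map (fun (i : Int) => PySem.Int.band (byte >>> (7 - i).toNat) 1)

-- The full bitstream of `data` (what A's first loop builds).
def pvFull (data : List Int) : List Int := data.flatMap pvByteBits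

-- Bit j of the stream, read straight out of `data` (Nat index).
def pvBitN (data : List Int) (j : Nat) : Int :=
  PySem.Int.band ((data.getD (j / 8) 0) >>> (7 - j % 8)) 1

lemma pvByteBits_length (byte : Int) : (pvByteBits byte).length = 8 := by
  simp [pvByteBits, PySem.List.length_pyRange_one]

lemma pvFull_foldl (data acc : List Int) :
    data.foldl (fun bs byte =>
      (PySem.List.pyRange 0 8 1).foldl (fun bs i =>
        bs ++ [PySem.Int.band (byte >>> (7 - i).toNat) 1]) bs) acc = acc ++ pvFull data := by
  induction data generalizing acc with
  | nil => simp [pvFull]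
  | cons b rest ih =>
      rw [List.foldl_cons, ih, PySem.List.foldl_append_singleton_eq_map]
      simp [pvFull, pvByteBits]

lemma pvFull_length (data : List Int) : (pvFull data).length = 8 * data.length := by
  induction data with
  | nil => simp [pvFull]
  | cons b rest ih => simp [pvFull, List.flatMap_cons, pvByteBits_length] at *; omega

lemma pvFull_getD (data : List Int) (j : Nat) (h : j < 8 * data.length) :
    (pvFull data).getD j 0 = pvBitN data j := by
  induction data generalizing j with
  | nil => simp at h
  | cons b rest ih =>
      have hfull : pvFull (b :: rest) = pvByteBits b ++ pvFull rest := by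
        simp [pvFull, List.flatMap_cons]
      by_cases hj : j < 8
      · rw [hfull, List.getD_append _ _ _ _ (by rw [pvByteBits_length]; omega)]
        have hb : (pvByteBits b).getD j 0 =
            PySem.Int.band (b >>> ((7 : Int) - ((0 : Int) + (j : Int))).toNat) 1 := by
          simp only [pvByteBits]
          rw [List.getD_eq_getElem _ _ (by simp [PySem.List.length_pyRange_one]; omega)]
          rw [List.getElem_map, PySem.List.getElem_pyRange_one]
        rw [hb]
        have hdiv : j / 8 = 0 := by omega
        have hmod : j % 8 = j := by omega
        have hcast : ((7 : Int) - ((0 : Int) + (j : Int))).toNat = 7 - j % 8 := by omega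
        rw [hcast]
        simp [pvBitN, hdiv, hmod]
      · rw [hfull, List.getD_append_right _ _ _ _ (by rw [pvByteBits_length]; omega)]
        rw [pvByteBits_length]
        have h' : j - 8 < 8 * rest.length := by simp at h; omega
        rw [ih _ h']
        have hdiv : (j - 8) / 8 + 1 = j / 8 := by omega
        have hmod : (j - 8) % 8 = j % 8 := by omega
        simp [pvBitN, ← hdiv, ← hmod, List.getD]

-- A's slice of the (truncated) bitstream for character i equals, as a list, the bits B reads.
lemma pvSlice_eq_map (data : List Int) (m iN : Nat) :
    (((pvFull data).take m).drop (7 * iN)).take 7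
      = (List.range (min (7 * (iN + 1)) (min (8 * data.length) m) - 7 * iN)).map
          (fun k => pvBitN data (7 * iN + k)) := by
  apply List.ext_getElem
  · simp [pvFull_length]; omega
  · intro k h1 h2
    have hlen : k < 7 ∧ 7 * iN + k < m ∧ 7 * iN + k < 8 * data.length := by
      simp [pvFull_length] at h1; omega
    simp only [List.getElem_take, List.getElem_drop, List.getElem_map, List.getElem_range]
    rw [← List.getD_eq_getElem _ 0 (by simp [pvFull_length]; omega)]
    rw [pvFull_getD _ _ (by omega)]

-- B's Int-level bit expression at a Nat-cast index is pvBitN.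
lemma pvBit_cast (data : List Int) (j : Nat) :
    PySem.Int.band ((PySem.List.pyGetD data (PySem.Int.floordiv (j : Int) 8) 0)
        >>> (7 - PySem.Int.mod (j : Int) 8).toNat) 1 = pvBitN data j := by
  have hd : PySem.Int.floordiv (j : Int) 8 = ((j / 8 : Nat) : Int) := by
    exact_mod_cast PySem.Int.floordiv_natCast j 8
  have hm : PySem.Int.mod (j : Int) 8 = ((j % 8 : Nat) : Int) := by
    exact_mod_cast PySem.Int.mod_natCast j 8
  have hmn : ((7 : Int) - ((j % 8 : Nat) : Int)).toNat = 7 - j % 8 := by omega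
  rw [hd, hm, hmn, PySem.List.pyGetD_natCast]
  rfl

-- Per-character equality: A's fold over its slice = B's fold over its index range.
lemma pvVal_eq (data : List Int) (fl i : Int) (h0 : 0 ≤ i) (hif : i < fl) :
    (PySem.List.slice (PySem.List.slice (pvFull data) none (some (fl * 7)))
        (some (i * 7)) (some ((i + 1) * 7))).foldl
      (fun v b => PySem.Int.bor (v <<< (1 : Nat)) b) 0
    = (PySem.List.pyRange (7 * i) (min (7 * (i + 1)) (min (8 * PySem.List.len data) (7 * fl))) 1).foldl
        (fun v j => PySem.Int.bor (v <<< (1 : Nat))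
          (PySem.Int.band ((PySem.List.pyGetD data (PySem.Int.floordiv j 8) 0)
            >>> (7 - PySem.Int.mod j 8).toNat) 1)) 0 := by
  obtain ⟨iN, rfl⟩ : ∃ n : Nat, i = (n : Int) := ⟨i.toNat, by omega⟩
  obtain ⟨flN, rfl⟩ : ∃ n : Nat, fl = (n : Int) := ⟨fl.toNat, by omega⟩
  -- left side: slices to drop/take, then the bit-list characterisation
  rw [show PySem.List.slice (pvFull data) none (some ((flN : Int) * 7))
        = (pvFull data).take (((flN : Int) * 7)).toNat from PySem.List.slice_to (pvFull data) (by positivity)]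
  have hm : (((flN : Int)) * 7).toNat = 7 * flN := by omega
  have ha : ((iN : Int)) * 7 = ((7 * iN : Nat) : Int) := by push_cast; ring
  have hb : (((iN : Int)) + 1) * 7 = ((7 * iN + 7 : Nat) : Int) := by push_cast; ring
  rw [hm, ha, hb, PySem.List.slice_natCast]
  have h7 : 7 * iN + 7 - 7 * iN = 7 := by omega
  rw [h7, pvSlice_eq_map data (7 * flN) iN, List.foldl_map]
  -- right side: pyRange to List.range
  rw [PySem.List.len_eq, PySem.List.pyRange_one, List.foldl_map]
  have hc : ((min (7 * ((iN : Int) + 1)) (min (8 * (data.length : Int)) (7 * (flN : Int)))) - 7 * (iN : Int)).toNat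
      = min (7 * (iN + 1)) (min (8 * data.length) (7 * flN)) - 7 * iN := by
    omega
  rw [hc]
  apply PySem.List.foldl_congr_mem
  intro acc k _
  have hk : 7 * (iN : Int) + (k : Int) = ((7 * iN + k : Nat) : Int) := by push_cast; ring
  rw [hk, pvBit_cast]

-- ===== VERDICT (by name: the statement is the Claim_ definition above) =====
theorem extract_flag_from_data_spec : Claim_equal_extract_flag_from_data := by
  intro data fl _
  unfold Spec_extract_flag_from_data extract_flag_from_data extract_flag_from_data_alt
  dsimp only
  rw [PySem.List.foldl_append_singleton_eq_map, PySem.List.foldl_append_singleton_eq_map]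
  simp only [List.nil_append, List.map_map]
  rw [pvFull_foldl, List.nil_append]
  apply congrArg
  apply List.map_congr_left
  intro i hi
  have hmem := (PySem.List.mem_pyRange_one).1 hi
  simp only [Function.comp_apply]
  rw [pvVal_eq data fl i hmem.1 hmem.2]
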